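-- pv_equiv track=rewrite | github.com/mooritexxx/shopifyseo | skills/shopify-product/scripts/generate_shopify_seo_update.py | flavor_families
-- ===== SOURCE A (Python) =====
-- def flavor_families(flavor: str):
--     f = flavor.lower()
--     families = []
--     if "mint" in f:
--         families.append("flavor_family_mint")
--     if "ice" in f or "iced" in f:
--         families.append("flavor_family_ice")
--     fruit_terms = [
--         "apple", "banana", "berry", "blue", "blueberry", "cherry", "cranapple",
--         "dragonfruit", "fruit", "fuji", "grape", "guava", "kiwi", "lemon",
--         "lychee", "mango", "melon", "orange", "passionfruit", "peach", "pear",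
--         "pineapple", "pomegranate", "razz", "sakura", "straw", "strawberry",
--         "tropical", "watermelon",
--     ]
--     if any(term in f for term in fruit_terms):
--         families.append("flavor_family_fruit")
--     if any(term in f for term in ["cloudz", "blast", "burst", "glubble", "prism"]):
--         families.append("flavor_family_candy")
--     if "classic" in f or "og" in f:
--         families.append("flavor_family_classic")
--     unique = []
--     for family in families:
--         if family not in unique:
--             unique.append(family)
--     return unique
-- ===== SOURCE B (Python) =====
-- # B: positional dictionary-matching instead of per-family substring tests.
-- # Walk every suffix of the lowercased string once, look up which terms start
-- # there via a term->tag map, collect the matched tags in a set, and emit them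
-- # in the canonical family order.
-- _TERM_TAG = {
--     "mint": "flavor_family_mint",
--     "ice": "flavor_family_ice", "iced": "flavor_family_ice",
--     "apple": "flavor_family_fruit", "banana": "flavor_family_fruit",
--     "berry": "flavor_family_fruit", "blue": "flavor_family_fruit",
--     "blueberry": "flavor_family_fruit", "cherry": "flavor_family_fruit",
--     "cranapple": "flavor_family_fruit", "dragonfruit": "flavor_family_fruit",
--     "fruit": "flavor_family_fruit", "fuji": "flavor_family_fruit",
--     "grape": "flavor_family_fruit", "guava": "flavor_family_fruit",
--     "kiwi": "flavor_family_fruit", "lemon": "flavor_family_fruit",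
--     "lychee": "flavor_family_fruit", "mango": "flavor_family_fruit",
--     "melon": "flavor_family_fruit", "orange": "flavor_family_fruit",
--     "passionfruit": "flavor_family_fruit", "peach": "flavor_family_fruit",
--     "pear": "flavor_family_fruit", "pineapple": "flavor_family_fruit",
--     "pomegranate": "flavor_family_fruit", "razz": "flavor_family_fruit",
--     "sakura": "flavor_family_fruit", "straw": "flavor_family_fruit",
--     "strawberry": "flavor_family_fruit", "tropical": "flavor_family_fruit",
--     "watermelon": "flavor_family_fruit",
--     "cloudz": "flavor_family_candy", "blast": "flavor_family_candy",
--     "burst": "flavor_family_candy", "glubble": "flavor_family_candy",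
--     "prism": "flavor_family_candy",
--     "classic": "flavor_family_classic", "og": "flavor_family_classic",
-- }
-- _ORDER = ["flavor_family_mint", "flavor_family_ice", "flavor_family_fruit",
--           "flavor_family_candy", "flavor_family_classic"]
--
-- def flavor_families(flavor: str):
--     f = flavor.lower()
--     hit = set()
--     for i in range(len(f)):
--         for term, tag in _TERM_TAG.items():
--             if f.startswith(term, i):
--                 hit.add(tag)
--     return [tag for tag in _ORDER if tag in hit]
-- ===== Notes on version B (the rewrite author's own statement) =====
-- stated objective: alternative
-- what changed: Replaces A's five per-family substring-membership tests plus a dedup pass by positional dictionary matching: one scan over every suffix position of the lowercased string with a term-to-tag map collecting matched tags into a set, emitted in a canonical family-order list.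
import Mathlib
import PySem

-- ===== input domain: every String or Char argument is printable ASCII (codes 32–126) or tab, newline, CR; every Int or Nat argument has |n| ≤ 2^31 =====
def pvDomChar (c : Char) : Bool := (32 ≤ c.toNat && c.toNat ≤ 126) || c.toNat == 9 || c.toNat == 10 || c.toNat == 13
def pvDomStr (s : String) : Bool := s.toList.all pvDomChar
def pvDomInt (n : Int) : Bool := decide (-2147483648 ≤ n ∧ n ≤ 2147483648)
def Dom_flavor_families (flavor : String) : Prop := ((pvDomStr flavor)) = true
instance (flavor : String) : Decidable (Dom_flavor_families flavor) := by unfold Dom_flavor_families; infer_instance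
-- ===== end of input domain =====

-- ===== PORT A =====
def flavor_families (flavor : String) : List String :=
  let f := PySem.Str.lower flavor
  let families : List String := []
  let families := if PySem.Str.isIn "mint" f then families ++ ["flavor_family_mint"] else families
  let families := if PySem.Str.isIn "ice" f || PySem.Str.isIn "iced" f then families ++ ["flavor_family_ice"] else families
  let fruit_terms : List String := ["apple", "banana", "berry", "blue", "blueberry", "cherry", "cranapple",
    "dragonfruit", "fruit", "fuji", "grape", "guava", "kiwi", "lemon",
    "lychee", "mango", "melon", "orange", "passionfruit", "peach", "pear",
    "pineapple", "pomegranate", "razz", "sakura", "straw", "strawberry",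
    "tropical", "watermelon"]
  let families := if fruit_terms.any (fun t => PySem.Str.isIn t f) then families ++ ["flavor_family_fruit"] else families
  let families := if (["cloudz", "blast", "burst", "glubble", "prism"] : List String).any (fun t => PySem.Str.isIn t f) then families ++ ["flavor_family_candy"] else families
  let families := if PySem.Str.isIn "classic" f || PySem.Str.isIn "og" f then families ++ ["flavor_family_classic"] else families
  families.foldl (fun unique family => if family ∈ unique then unique else unique ++ [family]) []

-- ===== PORT B =====
-- one honest line: B replaces A's per-family substring tests and dedup pass by a positional
-- scan of the string's suffixes against a term→tag map, collecting tags into a set that is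
-- emitted in canonical family order (objective: alternative decomposition).
def pvTermTag : List (String × String) :=
  [("mint", "flavor_family_mint"),
   ("ice", "flavor_family_ice"), ("iced", "flavor_family_ice"),
   ("apple", "flavor_family_fruit"), ("banana", "flavor_family_fruit"),
   ("berry", "flavor_family_fruit"), ("blue", "flavor_family_fruit"),
   ("blueberry", "flavor_family_fruit"), ("cherry", "flavor_family_fruit"),
   ("cranapple", "flavor_family_fruit"), ("dragonfruit", "flavor_family_fruit"),
   ("fruit", "flavor_family_fruit"), ("fuji", "flavor_family_fruit"),
   ("grape", "flavor_family_fruit"), ("guava", "flavor_family_fruit"),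
   ("kiwi", "flavor_family_fruit"), ("lemon", "flavor_family_fruit"),
   ("lychee", "flavor_family_fruit"), ("mango", "flavor_family_fruit"),
   ("melon", "flavor_family_fruit"), ("orange", "flavor_family_fruit"),
   ("passionfruit", "flavor_family_fruit"), ("peach", "flavor_family_fruit"),
   ("pear", "flavor_family_fruit"), ("pineapple", "flavor_family_fruit"),
   ("pomegranate", "flavor_family_fruit"), ("razz", "flavor_family_fruit"),
   ("sakura", "flavor_family_fruit"), ("straw", "flavor_family_fruit"),
   ("strawberry", "flavor_family_fruit"), ("tropical", "flavor_family_fruit"),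
   ("watermelon", "flavor_family_fruit"),
   ("cloudz", "flavor_family_candy"), ("blast", "flavor_family_candy"),
   ("burst", "flavor_family_candy"), ("glubble", "flavor_family_candy"),
   ("prism", "flavor_family_candy"),
   ("classic", "flavor_family_classic"), ("og", "flavor_family_classic")]

def pvOrder : List String :=
  ["flavor_family_mint", "flavor_family_ice", "flavor_family_fruit",
   "flavor_family_candy", "flavor_family_classic"]

-- Python's f.startswith(term, i): exact for 0 ≤ i (the only case Source B reaches, i from
-- range(len(f))) as a prefix test on the suffix from i; PySem has no start-argument startswith.
def pvStartswithFrom (f term : String) (i : Int) : Bool :=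
  PySem.Str.startswith (PySem.Str.slice f (some i) none) term

-- the 'hit' set of Source B: for i in range(len(f)): for term, tag in _TERM_TAG.items(): if f.startswith(term, i): hit.add(tag)
def pvHit (f : String) : PySem.Set String :=
  (PySem.List.pyRange 0 (PySem.Str.len f) 1).foldl
    (fun hit i =>
      pvTermTag.foldl
        (fun hit tt => if pvStartswithFrom f tt.1 i then PySem.Set.add hit tt.2 else hit)
        hit)
    PySem.Set.empty

def flavor_families_alt (flavor : String) : List String :=
  let f := PySem.Str.lower flavor
  let hit := pvHit f
  pvOrder.filter (fun tag => PySem.Set.contains hit tag)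

-- ===== PRECONDITION & SPEC =====
def Spec_flavor_families (flavor : String) (out : List String) : Prop := out = flavor_families_alt flavor
instance (flavor : String) (out : List String) : Decidable (Spec_flavor_families flavor out) := by unfold Spec_flavor_families; infer_instance

-- ===== CLAIM (what is proved, stated in full; the proofs are below) =====
def Claim_equal_flavor_families : Prop := ∀ (flavor : String), Dom_flavor_families flavor → Spec_flavor_families flavor (flavor_families flavor)

-- ===== LEMMAS AND PROOFS =====

theorem pv_contains_foldl_add (l : List (String × String)) (P : String × String → Bool)
    (s0 : PySem.Set String) (y : String) :
    PySem.Set.contains (l.foldl (fun s tt => if P tt then PySem.Set.add s tt.2 else s) s0) y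
      = (PySem.Set.contains s0 y || l.any (fun tt => P tt && (tt.2 == y))) := by
  induction l generalizing s0 with
  | nil => simp
  | cons hd tl ih =>
    simp only [List.foldl_cons, List.any_cons, ih]
    by_cases h : P hd = true
    · simp [h, Bool.or_assoc]
      congr 2
      rw [Bool.eq_iff_iff]
      simp only [decide_eq_true_eq, beq_iff_eq]
      exact eq_comm
    · have h' : P hd = false := by simpa using h
      simp [h']

theorem pv_contains_foldl_outer (is : List Int) (g : Int → String × String → Bool)
    (s0 : PySem.Set String) (y : String) :
    PySem.Set.contains
      (is.foldl (fun s i => pvTermTag.foldl (fun s tt => if g i tt then PySem.Set.add s tt.2 else s) s) s0) y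
      = (PySem.Set.contains s0 y || is.any (fun i => pvTermTag.any (fun tt => g i tt && (tt.2 == y)))) := by
  induction is generalizing s0 with
  | nil => simp
  | cons hd tl ih =>
    simp only [List.foldl_cons, List.any_cons, ih, pv_contains_foldl_add, Bool.or_assoc]

theorem pv_any_swap {α β : Type} (l : List α) (m : List β) (p : α → β → Bool) :
    (l.any fun a => m.any (p a)) = (m.any fun b => l.any (fun a => p a b)) := by
  rw [Bool.eq_iff_iff]
  simp only [List.any_eq_true]
  tauto

theorem pv_any_and_const {α : Type} (l : List α) (p : α → Bool) (c : Bool) :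
    (l.any fun x => p x && c) = (l.any p && c) := by
  cases c <;> simp

theorem pv_any_congr {α : Type} (l : List α) (p q : α → Bool)
    (h : ∀ x ∈ l, p x = q x) : l.any p = l.any q := by
  induction l with
  | nil => rfl
  | cons hd tl ih =>
    simp only [List.any_cons, h hd (List.mem_cons_self), ih (fun x hx => h x (List.mem_cons_of_mem _ hx))]

-- range(len(f)) scan of startswith on suffixes IS Python's 'term in f', for a nonempty term
theorem pv_any_startswith_eq_isIn (f t : String) (ht : t.toList ≠ []) :
    ((PySem.List.pyRange 0 (PySem.Str.len f) 1).any (fun i => pvStartswithFrom f t i))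
      = PySem.Str.isIn t f := by
  rw [Bool.eq_iff_iff]
  simp only [pvStartswithFrom]
  simp only [List.any_eq_true, PySem.Str.startswith_eq, PySem.Str.toList_slice,
    PySem.Str.isIn_eq, PySem.Str.len_eq, PySem.Chars.slice_eq_listSlice,
    PySem.Chars.startswith_iff, PySem.List.mem_pyRange_one]
  constructor
  · rintro ⟨i, ⟨h0, _⟩, hpre⟩
    rw [PySem.List.slice_from _ h0] at hpre
    exact (PySem.Chars.exists_prefix_drop_iff_isIn t.toList f.toList).mp ⟨i.toNat, hpre⟩
  · intro hin
    obtain ⟨j, hpre⟩ := (PySem.Chars.exists_prefix_drop_iff_isIn t.toList f.toList).mpr hin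
    have hj : j < f.toList.length := by
      by_contra h
      rw [List.drop_eq_nil_of_le (by omega)] at hpre
      exact ht (List.prefix_nil.mp hpre)
    refine ⟨(j : Int), ⟨by positivity, by exact_mod_cast hj⟩, ?_⟩
    rw [PySem.List.slice_from_natCast]
    exact hpre

-- the hit set contains a tag iff some (term, tag) rule has term a substring of f
theorem pv_contains_hit (f tag : String) :
    PySem.Set.contains (pvHit f) tag
      = pvTermTag.any (fun tt => PySem.Str.isIn tt.1 f && (tt.2 == tag)) := by
  unfold pvHit
  rw [pv_contains_foldl_outer]
  have hempty : PySem.Set.contains (PySem.Set.empty : PySem.Set String) tag = false := rfl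
  rw [hempty, Bool.false_or, pv_any_swap]
  refine pv_any_congr _ _ _ (fun tt htt => ?_)
  rw [pv_any_and_const, pv_any_startswith_eq_isIn]
  · fin_cases htt <;> decide

-- both programs are the same function of the five family flags
theorem pv_main (p : String → Bool) :
    (let families : List String := []
     let families := if p "mint" then families ++ ["flavor_family_mint"] else families
     let families := if p "ice" || p "iced" then families ++ ["flavor_family_ice"] else families
     let fruit_terms : List String := ["apple", "banana", "berry", "blue", "blueberry", "cherry", "cranapple",
       "dragonfruit", "fruit", "fuji", "grape", "guava", "kiwi", "lemon",
       "lychee", "mango", "melon", "orange", "passionfruit", "peach", "pear",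
       "pineapple", "pomegranate", "razz", "sakura", "straw", "strawberry",
       "tropical", "watermelon"]
     let families := if fruit_terms.any p then families ++ ["flavor_family_fruit"] else families
     let families := if (["cloudz", "blast", "burst", "glubble", "prism"] : List String).any p then families ++ ["flavor_family_candy"] else families
     let families := if p "classic" || p "og" then families ++ ["flavor_family_classic"] else families
     families.foldl (fun unique family => if family ∈ unique then unique else unique ++ [family]) [])
    = pvOrder.filter (fun tag => pvTermTag.any (fun tt => p tt.1 && (tt.2 == tag))) := by
  have e1 : pvTermTag.any (fun tt => p tt.1 && (tt.2 == "flavor_family_mint")) = p "mint" := by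
    simp [pvTermTag]
  have e2 : pvTermTag.any (fun tt => p tt.1 && (tt.2 == "flavor_family_ice")) = (p "ice" || p "iced") := by
    simp [pvTermTag]
  have e3 : pvTermTag.any (fun tt => p tt.1 && (tt.2 == "flavor_family_fruit"))
      = (["apple", "banana", "berry", "blue", "blueberry", "cherry", "cranapple",
          "dragonfruit", "fruit", "fuji", "grape", "guava", "kiwi", "lemon",
          "lychee", "mango", "melon", "orange", "passionfruit", "peach", "pear",
          "pineapple", "pomegranate", "razz", "sakura", "straw", "strawberry",
          "tropical", "watermelon"] : List String).any p := by
    simp [pvTermTag]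
  have e4 : pvTermTag.any (fun tt => p tt.1 && (tt.2 == "flavor_family_candy"))
      = (["cloudz", "blast", "burst", "glubble", "prism"] : List String).any p := by
    simp [pvTermTag]
  have e5 : pvTermTag.any (fun tt => p tt.1 && (tt.2 == "flavor_family_classic")) = (p "classic" || p "og") := by
    simp [pvTermTag]
  simp only [pvOrder, List.filter_cons, List.filter_nil, e1, e2, e3, e4, e5,
    List.any_cons, List.any_nil, Bool.or_false]
  generalize p "mint" = c1
  generalize (p "ice" || p "iced") = c2
  generalize (p "apple" || (p "banana" || (p "berry" || (p "blue" || (p "blueberry" || (p "cherry" || (p "cranapple" || (p "dragonfruit" || (p "fruit" || (p "fuji" || (p "grape" || (p "guava" || (p "kiwi" || (p "lemon" || (p "lychee" || (p "mango" || (p "melon" || (p "orange" || (p "passionfruit" || (p "peach" || (p "pear" || (p "pineapple" || (p "pomegranate" || (p "razz" || (p "sakura" || (p "straw" || (p "strawberry" || (p "tropical" || p "watermelon")))))))))))))))))))))))))))) = c3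
  generalize (p "cloudz" || (p "blast" || (p "burst" || (p "glubble" || p "prism")))) = c4
  generalize (p "classic" || p "og") = c5
  cases c1 <;> cases c2 <;> cases c3 <;> cases c4 <;> cases c5 <;> simp [List.foldl]

-- ===== VERDICT (by name: the statement is the Claim_ definition above) =====
theorem flavor_families_spec : Claim_equal_flavor_families := by
  intro flavor _
  unfold Spec_flavor_families flavor_families flavor_families_alt
  simp only [pv_contains_hit]
  exact pv_main (fun t => PySem.Str.isIn t (PySem.Str.lower flavor))
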